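-- pv_equiv track=rewrite | github.com/ChimeraWerks/ChimeraMemory | chimera_memory/memory_authored_writeback.py | _tags_from_topics
-- ===== SOURCE A (Python) =====
-- from typing import Any
--
-- def _tags_from_topics(value: Any) -> list[str]:
--     if not isinstance(value, list):
--         return ["structured-writeback"]
--     tags = ["structured-writeback"]
--     seen = set(tags)
--     for item in value:
--         tag = str(item or "").strip()
--         if not tag or tag in seen:
--             continue
--         tags.append(tag)
--         seen.add(tag)
--     return tags
-- ===== SOURCE B (Python) =====
-- from typing import Any
--
-- def _tags_from_topics(value: Any) -> list[str]:
--     if not isinstance(value, list):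
--         return ["structured-writeback"]
--     stripped = [str(item or "").strip() for item in value]
--     pairs = sorted((t, i) for i, t in enumerate(stripped))
--     firsts = []
--     prev = None
--     for t, i in pairs:
--         if t != prev and t and t != "structured-writeback":
--             firsts.append(i)
--         prev = t
--     firsts.sort()
--     return ["structured-writeback"] + [stripped[i] for i in firsts]
-- ===== Notes on version B (the rewrite author's own statement) =====
-- stated objective: alternative
-- what changed: B eliminates A's running 'seen' set: it sorts the (stripped tag, index) pairs lexicographically, takes the index at each tag-run boundary (the first occurrence of each distinct tag), sorts those indices back into list order and reads the tags off them - sort-then-scan instead of a one-pass hash-set dedup.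
import Mathlib
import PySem

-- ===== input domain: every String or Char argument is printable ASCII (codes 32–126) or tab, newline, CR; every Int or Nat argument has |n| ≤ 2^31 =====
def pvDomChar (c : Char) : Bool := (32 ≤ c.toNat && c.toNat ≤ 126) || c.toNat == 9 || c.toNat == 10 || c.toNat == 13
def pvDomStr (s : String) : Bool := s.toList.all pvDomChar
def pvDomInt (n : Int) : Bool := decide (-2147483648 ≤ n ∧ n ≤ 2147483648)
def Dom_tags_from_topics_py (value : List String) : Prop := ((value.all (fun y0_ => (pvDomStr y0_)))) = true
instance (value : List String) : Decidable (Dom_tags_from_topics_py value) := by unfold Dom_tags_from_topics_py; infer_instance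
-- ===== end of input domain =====

-- B replaces A's single pass with a running 'seen' set by sort-then-scan: it sorts (tag, index)
-- pairs lexicographically, emits the index at each tag-run boundary (= first occurrence), and
-- re-sorts those indices (alternative algorithm; return value proved equal, no speed claim).


-- ===== PORT A =====
-- value : List String, so A's isinstance(value, list) guard is always passed;
-- for a string item, 'str(item or "")' is item itself ('' stays '').
def stepA (st : List String × PySem.Set String) (item : String) : List String × PySem.Set String :=
  let tag := PySem.Str.strip item
  if tag = "" ∨ PySem.Set.contains st.2 tag then st
  else (st.1 ++ [tag], PySem.Set.add st.2 tag)

def tags_from_topics_py (value : List String) : List String :=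
  (value.foldl stepA (["structured-writeback"], PySem.Set.ofList ["structured-writeback"])).1

-- ===== PORT B =====
-- B's scan state: (firsts, prev); 'prev = None' is 'none', and "t != prev" against None is true.
def stepScan (st : List Int × Option String) (p : String × Int) : List Int × Option String :=
  ((if some p.1 ≠ st.2 ∧ p.1 ≠ "" ∧ p.1 ≠ "structured-writeback" then st.1 ++ [p.2] else st.1),
   some p.1)

-- sorted(pairs) on 2-tuples compares lexicographically = PySem.List.sorted2 with the two projections;
-- stripped[i] on the in-range indices produced by enumerate is exact as pyGetD with an unused default.
def tags_from_topics_py_alt (value : List String) : List String :=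
  let stripped := value.map (fun item => PySem.Str.strip item)
  let pairs := PySem.List.sorted2 ((PySem.List.enumerate stripped 0).map (fun q => (q.2, q.1)))
                 (fun p => p.1) (fun p => p.2) false
  let firsts := (pairs.foldl stepScan ([], none)).1
  let firstsSorted := PySem.List.sorted firsts (fun x => x) false
  "structured-writeback" :: firstsSorted.map (fun i => PySem.List.pyGetD stripped i "")

-- ===== PRECONDITION & SPEC =====
def Spec_tags_from_topics_py (value : List String) (out : List String) : Prop := out = tags_from_topics_py_alt value
instance (value : List String) (out : List String) : Decidable (Spec_tags_from_topics_py value out) := by unfold Spec_tags_from_topics_py; infer_instance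

-- ===== CLAIM (what is proved, stated in full; the proofs are below) =====
def Claim_equal_tags_from_topics_py : Prop := ∀ (value : List String), Dom_tags_from_topics_py value → Spec_tags_from_topics_py value (tags_from_topics_py value)

-- ===== LEMMAS AND PROOFS =====

-- a tag survives into the output iff it is non-empty and not the seed tag
def validB (t : String) : Bool := !(t == "") && !(t == "structured-writeback")

-- ---------- A side: A's loop is Set.add folded over the stripped non-empty items ----------
theorem loopA_eq_fold_add (xs : List String) :
    ∀ (t : List String),
      (xs.foldl stepA (t, t)).1
      = List.foldl PySem.Set.add t ((xs.map (fun item => PySem.Str.strip item)).filter (fun s => !(s == ""))) := by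
  induction xs with
  | nil => intro t; simp
  | cons x xs ih =>
    intro t
    rw [List.foldl_cons, List.map_cons, List.filter_cons]
    by_cases he : PySem.Str.strip x = ""
    · have h1 : stepA (t, t) x = (t, t) := by simp [stepA, he]
      rw [h1, ih t]; simp [he]
    · by_cases hc : PySem.Str.strip x ∈ t
      · have h1 : stepA (t, t) x = (t, t) := by simp [stepA, hc]
        have h2 : PySem.Set.add t (PySem.Str.strip x) = t := by simp [PySem.Set.add, hc]
        rw [h1, ih t]
        simp [he, h2]
      · have h1 : stepA (t, t) x = (t ++ [PySem.Str.strip x], t ++ [PySem.Str.strip x]) := by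
          simp [stepA, he, hc]
        have h2 : PySem.Set.add t (PySem.Str.strip x) = t ++ [PySem.Str.strip x] := by
          simp [PySem.Set.add, hc]
        rw [h1, ih (t ++ [PySem.Str.strip x])]
        simp [he, h2]

theorem fold_add_skip_mem (xs : List String) :
    ∀ (pre : List String) (c : String), c ∈ pre →
      List.foldl PySem.Set.add pre xs = List.foldl PySem.Set.add pre (xs.filter (fun s => !(s == c))) := by
  induction xs with
  | nil => intros; rfl
  | cons x xs ih =>
    intro pre c hc
    rw [List.filter_cons]
    by_cases hx : x = c
    · subst hx
      have h0 : PySem.Set.add pre x = pre := by simp [PySem.Set.add, PySem.Set.contains, hc]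
      simp only [beq_self_eq_true, Bool.not_true, List.foldl_cons, h0]
      exact ih pre x hc
    · have hmem : c ∈ PySem.Set.add pre x := by
        simp [PySem.Set.add]; split_ifs <;> simp [hc]
      simp [hx, List.foldl_cons, ih (PySem.Set.add pre x) c hmem]

theorem fold_add_cons_of_ne (xs : List String) :
    ∀ (acc : List String) (c : String), (∀ x ∈ xs, x ≠ c) →
      List.foldl PySem.Set.add (c :: acc) xs = c :: List.foldl PySem.Set.add acc xs := by
  induction xs with
  | nil => intros; rfl
  | cons x xs ih =>
    intro acc c hne
    have hx : x ≠ c := hne x (by simp)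
    have h1 : PySem.Set.add (c :: acc) x = c :: PySem.Set.add acc x := by
      simp [PySem.Set.add, PySem.Set.contains, hx]
      split_ifs <;> simp_all
    rw [List.foldl_cons, h1, List.foldl_cons, ih (PySem.Set.add acc x) c (fun y hy => hne y (by simp [hy]))]

-- A = seed :: dedup of the valid stripped items
theorem A_eq_dedup (value : List String) :
    tags_from_topics_py value
      = "structured-writeback" :: PySem.List.dedup ((value.map (fun item => PySem.Str.strip item)).filter validB) := by
  unfold tags_from_topics_py
  rw [show PySem.Set.ofList ["structured-writeback"] = ["structured-writeback"] from rfl,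
      loopA_eq_fold_add,
      fold_add_skip_mem _ _ "structured-writeback" (by simp),
      List.filter_filter]
  have hf : (fun a => !(a == "structured-writeback") && !(a == "")) = validB := by
    funext a; simp [validB, Bool.and_comm]
  rw [hf, fold_add_cons_of_ne _ [] "structured-writeback"
        (by intro x hx; simp [validB, List.mem_filter] at hx; exact hx.2.2),
      PySem.List.dedup_eq_ofList, PySem.Set.ofList_eq_foldl]

-- ---------- B side: the scan as a structural recursion ----------
def minsF : List (String × Int) → Option String → List Int
  | [], _ => []
  | p :: ys, prev =>
      (if some p.1 ≠ prev ∧ p.1 ≠ "" ∧ p.1 ≠ "structured-writeback" then [p.2] else [])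
        ++ minsF ys (some p.1)

theorem foldl_stepScan_eq_minsF (ys : List (String × Int)) :
    ∀ (acc : List Int) (prev : Option String),
      (ys.foldl stepScan (acc, prev)).1 = acc ++ minsF ys prev := by
  induction ys with
  | nil => intros; simp [minsF]
  | cons p ys ih =>
    intro acc prev
    rw [List.foldl_cons, minsF]
    by_cases hc : some p.1 ≠ prev ∧ p.1 ≠ "" ∧ p.1 ≠ "structured-writeback"
    · simp only [stepScan, if_pos hc]
      rw [ih, List.append_assoc]
    · simp only [stepScan, if_neg hc]
      rw [ih]
      simp

-- strict lexicographic order on (tag, index) pairs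
def lexLt (p q : String × Int) : Prop := p.1 < q.1 ∨ (p.1 = q.1 ∧ p.2 < q.2)

def prevLE : Option String → String → Prop
  | none, _ => True
  | some p, t => p ≤ t

-- on a strictly lex-sorted list, the scan emits exactly the minimal index of each valid tag ≠ prev
theorem mem_minsF : ∀ (ys : List (String × Int)), List.Pairwise lexLt ys →
    ∀ (prev : Option String), (∀ q ∈ ys, prevLE prev q.1) →
      ∀ (k : Int), (k ∈ minsF ys prev ↔
        ∃ t, validB t = true ∧ some t ≠ prev ∧ (t, k) ∈ ys ∧ ∀ j, (t, j) ∈ ys → k ≤ j) := by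
  intro ys
  induction ys with
  | nil => intro _ prev _ k; simp [minsF]
  | cons p rest ih =>
    intro hp prev hprev k
    obtain ⟨hlt, hrest⟩ := List.pairwise_cons.1 hp
    obtain ⟨t, i⟩ := p
    have hle : ∀ q ∈ rest, prevLE (some t) q.1 := by
      intro q hq
      rcases hlt q hq with h | ⟨h, _⟩
      · exact le_of_lt h
      · exact le_of_eq h
    have IH := ih hrest (some t) hle k
    constructor
    · intro hk
      rw [minsF] at hk
      rcases List.mem_append.1 hk with hk | hk
      · split_ifs at hk with hc
        · simp only [List.mem_singleton] at hk
          refine ⟨t, by simp [validB, hc.2.1, hc.2.2], hc.1, by rw [hk]; exact List.mem_cons_self, ?_⟩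
          intro j hj
          rcases List.mem_cons.1 hj with hj | hj
          · have h2 : i = j := congrArg Prod.snd hj.symm
            omega
          · rcases hlt (t, j) hj with h | ⟨_, h⟩
            · exact absurd h (lt_irrefl t)
            · rw [hk]; exact le_of_lt h
        · simp at hk
      · obtain ⟨t', hval, hne, hmem, hmin⟩ := IH.1 hk
        have htne : t' ≠ t := fun h => hne (by rw [h])
        have hlt' : t < t' := by
          rcases hlt (t', k) hmem with h | ⟨h, _⟩
          · exact h
          · exact absurd h.symm htne
        refine ⟨t', hval, ?_, List.mem_cons_of_mem _ hmem, ?_⟩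
        · cases prev with
          | none => simp
          | some pp =>
            have hpt : pp ≤ t := hprev (t, i) List.mem_cons_self
            intro h
            have : t' = pp := by injection h
            subst this
            exact absurd hlt' (not_lt_of_ge hpt)
        · intro j hj
          rcases List.mem_cons.1 hj with hj | hj
          · exact absurd (congrArg Prod.fst hj) htne
          · exact hmin j hj
    · rintro ⟨t', hval, hne, hmem, hmin⟩
      rw [minsF]
      rcases List.mem_cons.1 hmem with h | h
      · have ht : t' = t := congrArg Prod.fst h
        have hk : k = i := congrArg Prod.snd h
        subst ht; subst hk
        have hv : t' ≠ "" ∧ t' ≠ "structured-writeback" := by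
          simpa [validB] using hval
        rw [if_pos ⟨hne, hv.1, hv.2⟩]
        simp
      · by_cases htt : t' = t
        · subst htt
          have h1 : k ≤ i := hmin i List.mem_cons_self
          rcases hlt (t', k) h with h2 | ⟨_, h2⟩
          · exact absurd h2 (lt_irrefl _)
          · omega
        · refine List.mem_append_right _ (IH.2 ⟨t', hval, ?_, h, fun j hj => hmin j (List.mem_cons_of_mem _ hj)⟩)
          intro hcontra
          exact htt (by injection hcontra)

theorem minsF_sublist (ys : List (String × Int)) :
    ∀ (prev : Option String), (minsF ys prev).Sublist (ys.map (fun p => p.2)) := by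
  induction ys with
  | nil => intro _; simp [minsF]
  | cons p ys ih =>
    intro prev
    rw [minsF, List.map_cons]
    by_cases hc : some p.1 ≠ prev ∧ p.1 ≠ "" ∧ p.1 ≠ "structured-writeback"
    · rw [if_pos hc]
      exact (ih (some p.1)).cons₂ p.2
    · rw [if_neg hc]
      exact (ih (some p.1)).cons p.2

-- sorted2 with the two projections is sorted with the lexicographic key
theorem sorted2_eq_sorted_lex (xs : List (String × Int)) :
    PySem.List.sorted2 xs (fun p => p.1) (fun p => p.2) false
      = PySem.List.sorted xs (fun p => toLex p) false := by
  unfold PySem.List.sorted2 PySem.List.sorted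
  simp only [if_neg (by decide : ¬ (false = true))]
  have hb : (fun (a b : String × Int) => decide (a.1 < b.1) || (!decide (b.1 < a.1) && decide (a.2 < b.2)))
      = (fun (a b : String × Int) => decide ((toLex a : Lex (String × Int)) < toLex b)) := by
    funext a b
    rcases lt_trichotomy a.1 b.1 with h | h | h
    · simp [Prod.Lex.lt_iff, h]
    · simp [Prod.Lex.lt_iff, h]
    · have h1 : ¬ a.1 < b.1 := lt_asymm h
      have h2 : a.1 ≠ b.1 := h.ne'
      simp [Prod.Lex.lt_iff, h, h1, h2]
  rw [hb]

-- ---------- the canonical first-occurrence index list ----------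
def firstPred (L : List String) (i : Nat) : Bool :=
  validB (L.getD i "") && decide (∀ j, j < i → L.getD j "" ≠ L.getD i "")

def canonIdx (L : List String) : List Int :=
  List.map (fun (i : Nat) => (i : Int)) ((List.range L.length).filter (firstPred L))

theorem canonIdx_pairwise (L : List String) : List.Pairwise (· < ·) (canonIdx L) := by
  unfold canonIdx
  rw [List.pairwise_map]
  exact (List.Pairwise.sublist List.filter_sublist List.pairwise_lt_range).imp
    (fun {a b} h => by exact_mod_cast h)

theorem canonIdx_nodup (L : List String) : (canonIdx L).Nodup := by
  exact (canonIdx_pairwise L).imp (fun h => ne_of_lt h)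

theorem mem_canonIdx (L : List String) (k : Int) :
    k ∈ canonIdx L ↔
      ∃ i : Nat, i < L.length ∧ k = (i : Int) ∧ validB (L.getD i "") = true ∧
        ∀ j, j < i → L.getD j "" ≠ L.getD i "" := by
  unfold canonIdx firstPred
  simp
  tauto

theorem ofList_snoc (M : List String) (y : String) :
    PySem.Set.ofList (M ++ [y]) = PySem.Set.ofList M ++ (if y ∈ M then [] else [y]) := by
  rw [PySem.Set.ofList_eq_foldl, List.foldl_append,
      show List.foldl PySem.Set.add (List.foldl PySem.Set.add [] M) [y]
        = PySem.Set.add (List.foldl PySem.Set.add [] M) y from rfl,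
      ← PySem.Set.ofList_eq_foldl]
  by_cases h : y ∈ M
  · simp [PySem.Set.add, PySem.Set.contains, PySem.Set.mem_ofList, h]
  · simp [PySem.Set.add, PySem.Set.contains, PySem.Set.mem_ofList, h]

-- reading the canonical indices back from L is exactly ordered dedup of the valid items
theorem mapG_eq_dedup : ∀ (L : List String),
    ((List.range L.length).filter (firstPred L)).map (fun i => L.getD i "")
      = PySem.List.dedup (L.filter validB) := by
  intro L
  induction L using List.reverseRecOn with
  | nil => rfl
  | append_singleton L x ih =>
    have hn : (L ++ [x]).length = L.length + 1 := by simp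
    have hg : ∀ j, j < L.length → (L ++ [x]).getD j "" = L.getD j "" := fun j hj =>
      List.getD_append _ _ _ _ hj
    have hgx : (L ++ [x]).getD L.length "" = x := by
      simp [List.getD]
    have hcongr : (List.range L.length).filter (firstPred (L ++ [x]))
        = (List.range L.length).filter (firstPred L) := by
      apply List.filter_congr
      intro i hi
      rw [List.mem_range] at hi
      unfold firstPred
      rw [hg i hi]
      have hiff : (∀ j, j < i → (L ++ [x]).getD j "" ≠ L.getD i "")
          ↔ (∀ j, j < i → L.getD j "" ≠ L.getD i "") := by
        constructor
        · intro h j hj; rw [← hg j (lt_trans hj hi)]; exact h j hj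
        · intro h j hj; rw [hg j (lt_trans hj hi)]; exact h j hj
      exact congrArg (fun b => validB (L.getD i "") && b) (decide_eq_decide.mpr hiff)
    have hmapL : ((List.range L.length).filter (firstPred L)).map (fun i => (L ++ [x]).getD i "")
        = ((List.range L.length).filter (firstPred L)).map (fun i => L.getD i "") := by
      apply List.map_congr_left
      intro i hi
      rw [List.mem_filter, List.mem_range] at hi
      exact hg i hi.1
    have hnotin : (∀ j, j < L.length → L.getD j "" ≠ x) ↔ x ∉ L := by
      constructor
      · intro h hx
        obtain ⟨j, hj, hjx⟩ := List.mem_iff_getElem.1 hx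
        exact h j hj (by rw [List.getD_eq_getElem _ _ hj]; exact hjx)
      · intro hx j hj heq
        rw [List.getD_eq_getElem _ _ hj] at heq
        exact hx (heq ▸ List.getElem_mem hj)
    have hhead : firstPred (L ++ [x]) L.length
        = (validB x && decide (x ∉ L)) := by
      unfold firstPred
      rw [hgx]
      refine congrArg (fun b => validB x && b) (decide_eq_decide.mpr ?_)
      rw [← hnotin]
      constructor
      · intro h j hj; rw [← hg j hj]; exact h j hj
      · intro h j hj; rw [hg j hj]; exact h j hj
    rw [hn, List.range_succ, List.filter_append, hcongr, List.map_append, hmapL, ih,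
        List.filter_append, List.filter_cons, List.filter_nil]
    by_cases hv : validB x = true
    · by_cases hx : x ∈ L
      · have hx' : x ∈ L.filter validB := List.mem_filter.2 ⟨hx, hv⟩
        rw [hhead]
        simp [hv, hx, ofList_snoc, hx']
      · have hx' : x ∉ L.filter validB := fun h => hx (List.mem_filter.1 h).1
        rw [hhead]
        simp [hv, hx, ofList_snoc, hx', hgx]
    · have hv' : validB x = false := by simpa using hv
      rw [hhead]
      simp [hv']

-- ---------- assembling B ----------
theorem B_eq_dedup (value : List String) :
    tags_from_topics_py_alt value
      = "structured-writeback" :: PySem.List.dedup ((value.map (fun item => PySem.Str.strip item)).filter validB) := by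
  set L := value.map (fun item => PySem.Str.strip item) with hL
  set pairs0 := (PySem.List.enumerate L 0).map (fun q => (q.2, q.1)) with hp0
  have hmem0 : ∀ (t : String) (k : Int), (t, k) ∈ pairs0 ↔
      ∃ m : Nat, m < L.length ∧ t = L.getD m "" ∧ k = (m : Int) := by
    intro t k
    rw [hp0]
    simp only [List.mem_map]
    constructor
    · rintro ⟨q, hq, hqe⟩
      obtain ⟨m, hm, rfl⟩ := (PySem.List.mem_enumerate_iff L 0 q).1 hq
      have h1 : t = L[m] := (congrArg Prod.fst hqe).symm
      have h2 : k = 0 + (m : Int) := (congrArg Prod.snd hqe).symm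
      exact ⟨m, hm, by rw [h1, List.getD_eq_getElem _ _ hm], by omega⟩
    · rintro ⟨m, hm, ht, hk⟩
      refine ⟨((m : Int), L[m]), (PySem.List.mem_enumerate_iff L 0 _).2 ⟨m, hm, by simp⟩, ?_⟩
      rw [List.getD_eq_getElem _ _ hm] at ht
      simp [ht, hk]
  have hpw0 : pairs0.Pairwise (fun p q => p.2 < q.2) := by
    rw [hp0, List.pairwise_map]
    exact PySem.List.pairwise_lt_enumerate L 0
  have hnodup0 : pairs0.Nodup :=
    hpw0.imp (fun h heq => by rw [heq] at h; exact lt_irrefl _ h)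
  set sortedP := PySem.List.sorted pairs0 (fun p => (toLex p : Lex (String × Int))) false with hsp
  have hperm : sortedP.Perm pairs0 := PySem.List.sorted_perm _ _ _
  have hnodupS : sortedP.Nodup := (hperm.nodup_iff).2 hnodup0
  have hpw_le : sortedP.Pairwise (fun a b => (toLex a : Lex (String × Int)) ≤ toLex b) :=
    PySem.List.sorted_pairwise _ _
  have hpw_lt : sortedP.Pairwise (fun a b => (toLex a : Lex (String × Int)) < toLex b) := by
    refine (hpw_le.and hnodupS).imp ?_
    rintro a b ⟨hle, hne⟩
    exact lt_of_le_of_ne hle (fun hh => hne (by simpa using congrArg ofLex hh))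
  have hpw_lex : sortedP.Pairwise lexLt := by
    refine hpw_lt.imp ?_
    intro a b h
    have := Prod.Lex.lt_iff.1 h
    simpa [lexLt] using this
  have hfirsts : (sortedP.foldl stepScan ([], none)).1 = minsF sortedP none := by
    rw [foldl_stepScan_eq_minsF]; simp
  have hmemF : ∀ k : Int, k ∈ minsF sortedP none ↔ k ∈ canonIdx L := by
    intro k
    rw [mem_minsF sortedP hpw_lex none (fun q _ => trivial) k, mem_canonIdx]
    constructor
    · rintro ⟨t, hval, -, hmem, hmin⟩
      rw [hperm.mem_iff, hmem0] at hmem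
      obtain ⟨m, hm, ht, hk⟩ := hmem
      refine ⟨m, hm, hk, by rw [← ht]; exact hval, ?_⟩
      intro j hj heq
      have hjm : (t, (j : Int)) ∈ sortedP := by
        rw [hperm.mem_iff, hmem0]
        exact ⟨j, lt_trans hj hm, by rw [ht, heq], rfl⟩
      have := hmin _ hjm
      rw [hk] at this
      have : m ≤ j := by exact_mod_cast this
      omega
    · rintro ⟨m, hm, hk, hval, hfirst⟩
      refine ⟨L.getD m "", hval, by simp, ?_, ?_⟩
      · rw [hperm.mem_iff, hmem0]
        exact ⟨m, hm, rfl, hk⟩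
      · intro j hj
        rw [hperm.mem_iff, hmem0] at hj
        obtain ⟨m', hm', ht', hj'⟩ := hj
        have hmm : m ≤ m' := by
          by_contra hcon
          exact hfirst m' (by omega) ht'.symm
        rw [hk, hj']
        exact_mod_cast hmm
  have hnodupF : (minsF sortedP none).Nodup := by
    have hsub := minsF_sublist sortedP none
    have hmapnd : (sortedP.map (fun p => p.2)).Nodup := by
      have : (sortedP.map (fun p => p.2)).Perm (pairs0.map (fun p => p.2)) := hperm.map _
      refine this.nodup_iff.2 ?_
      exact (List.pairwise_map.2 hpw0).imp (fun h => ne_of_lt h)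
    exact hsub.nodup hmapnd
  have hpermC : (canonIdx L).Perm (minsF sortedP none) :=
    (List.perm_ext_iff_of_nodup (canonIdx_nodup L) hnodupF).2 (fun a => (hmemF a).symm)
  have hsortedF : PySem.List.sorted (minsF sortedP none) (fun x => x) false = canonIdx L :=
    PySem.List.sorted_eq_of_perm_of_pairwise_lt _ _ _ hpermC (canonIdx_pairwise L)
  have hfinal : (canonIdx L).map (fun i => PySem.List.pyGetD L i "")
      = PySem.List.dedup (L.filter validB) := by
    unfold canonIdx
    rw [List.map_map]
    rw [show ((fun i => PySem.List.pyGetD L i "") ∘ (fun (i : Nat) => (i : Int)))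
          = (fun (i : Nat) => L.getD i "") from by
        funext i; simp [Function.comp, PySem.List.pyGetD_natCast]]
    exact mapG_eq_dedup L
  rw [show tags_from_topics_py_alt value
        = "structured-writeback" ::
            (PySem.List.sorted
              ((PySem.List.sorted2 pairs0 (fun p => p.1) (fun p => p.2) false).foldl
                stepScan ([], none)).1 (fun x => x) false).map
              (fun i => PySem.List.pyGetD L i "") from rfl,
      sorted2_eq_sorted_lex, ← hsp, hfirsts, hsortedF, hfinal]

-- ===== VERDICT (by name: the statement is the Claim_ definition above) =====
theorem tags_from_topics_py_spec : Claim_equal_tags_from_topics_py := by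
  intro value _
  unfold Spec_tags_from_topics_py
  rw [A_eq_dedup, B_eq_dedup]
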